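-- pv_equiv track=rewrite | github.com/nuvention-web/A-2019-backend | testsite/utils/colorDetect.py | getColorMapping
-- ===== SOURCE A (Python) =====
-- def getColorMapping(color):
--     json = {
--         'red': ['LightPink', 'Pink', 'Crimson', 'HotPink', 'DeepPink', 'Orchid', 'Thistle', 'Plum', 'Magenta',
--                 'DarkMagenta',
--                 'PeachPuff', 'LightSalmon', 'OrangeRed', 'DarkSalmon', 'Tomato', 'MistyRose', 'LightCoral',
--                 'RosyBrown', 'IndianRed', 'Red', 'FireBrick', 'DarkRed'],
--         'purple': ['LavenderBlush', 'PaleVioletRed', 'MediumVioletRed', 'Violet', 'Purple', 'MediumOrchid',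
--                    'DarkViolet',
--                    'DarkOrchid', 'Indigo', 'BlueViolet', 'MediumPurple'],
--         'blue': ['MediumSlateBlue', 'SlateBlue', 'DarkSlateBlue', 'Lavender', 'Blue', 'MediumBlue', 'MidnightBlue',
--                  'DarkBlue',
--                  'Navy', 'RoyalBlue', 'CornflowerBlue', 'LightSteelBlue', 'DodgerBlue',
--                  'AliceBlue', 'SteelBlue', 'LightSkyBlue', 'SkyBlue', 'DeepSkyBlue', 'LightBlue', 'PowderBlue',
--                  'CadetBlue', 'Azure', 'PaleTurquoise', 'Aqua', 'DarkTurquoise', 'MediumTurquoise',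
--                  'Aquamarine', 'MediumAquamarine'],
--         'gray': ['SlateGray', 'LightSlateGray', 'DarkSlateGray', 'Gainsboro', 'LightGrey', 'Silver',
--                  'DarkGray', 'Gray', 'DimGray'],
--         'black': ['Black'],
--         'green': ['LightCyan', 'Cyan', 'DarkCyan', 'Teal', 'LightSeaGreen', 'Turquoise', 'MediumSpringGreen',
--                   'SpringGreen', 'MediumSeaGreen', 'SeaGreen', 'LightGreen', 'PaleGreen',
--                   'DarkSeaGreen', 'LimeGreen', 'Lime', 'ForestGreen', 'Green', 'DarkGreen', 'Chartreuse',
--                   'LawnGreen', 'GreenYellow', 'DarkOliveGreen', 'YellowGreen', 'OliveDrab', 'Olive'],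
--         'white': ['GhostWhite', 'MintCream', 'Honeydew', 'Beige', 'Ivory', 'FloralWhite', 'OldLace', 'BlanchedAlmond',
--                   'NavajoWhite', 'AntiqueWhite', 'Snow', 'White', 'WhiteSmoke', ],
--         'yellow': ['LightGoldenrodYellow', 'LightYellow', 'Yellow', 'DarkKhaki', 'LemonChiffon', 'PaleGoldenrod',
--                    'Khaki', 'Gold', 'Cornsilk', 'Goldenrod', 'DarkGoldenrod', 'Wheat', 'Moccasin',
--                    'Orange', 'PapayaWhip', 'Tan', 'BurlyWood', 'Bisque', 'DarkOrange', 'Linen', 'Peru',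
--                    'Seashell', 'Sienna', 'Salmon', 'Maroon'],
--         'brown': ['Chocolate', 'SandyBrown', 'SaddleBrown', 'Coral', 'Brown', ]
--     }
--
--     for key, value in json.items():
--         if color in value:
--             return key
-- ===== SOURCE B (Python) =====
-- _GROUPS = [
--     ('red', 'LightPink Pink Crimson HotPink DeepPink Orchid Thistle Plum Magenta DarkMagenta PeachPuff LightSalmon OrangeRed DarkSalmon Tomato MistyRose LightCoral RosyBrown IndianRed Red FireBrick DarkRed'),
--     ('purple', 'LavenderBlush PaleVioletRed MediumVioletRed Violet Purple MediumOrchid DarkViolet DarkOrchid Indigo BlueViolet MediumPurple'),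
--     ('blue', 'MediumSlateBlue SlateBlue DarkSlateBlue Lavender Blue MediumBlue MidnightBlue DarkBlue Navy RoyalBlue CornflowerBlue LightSteelBlue DodgerBlue AliceBlue SteelBlue LightSkyBlue SkyBlue DeepSkyBlue LightBlue PowderBlue CadetBlue Azure PaleTurquoise Aqua DarkTurquoise MediumTurquoise Aquamarine MediumAquamarine'),
--     ('gray', 'SlateGray LightSlateGray DarkSlateGray Gainsboro LightGrey Silver DarkGray Gray DimGray'),
--     ('black', 'Black'),
--     ('green', 'LightCyan Cyan DarkCyan Teal LightSeaGreen Turquoise MediumSpringGreen SpringGreen MediumSeaGreen SeaGreen LightGreen PaleGreen DarkSeaGreen LimeGreen Lime ForestGreen Green DarkGreen Chartreuse LawnGreen GreenYellow DarkOliveGreen YellowGreen OliveDrab Olive'),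
--     ('white', 'GhostWhite MintCream Honeydew Beige Ivory FloralWhite OldLace BlanchedAlmond NavajoWhite AntiqueWhite Snow White WhiteSmoke'),
--     ('yellow', 'LightGoldenrodYellow LightYellow Yellow DarkKhaki LemonChiffon PaleGoldenrod Khaki Gold Cornsilk Goldenrod DarkGoldenrod Wheat Moccasin Orange PapayaWhip Tan BurlyWood Bisque DarkOrange Linen Peru Seashell Sienna Salmon Maroon'),
--     ('brown', 'Chocolate SandyBrown SaddleBrown Coral Brown'),
-- ]
--
-- # inverted name -> group table, built once from compact space-separated name strings
-- _NAME_TO_GROUP = {name: group for group, names in _GROUPS for name in names.split()}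
--
--
-- def getColorMapping(color):
--     return _NAME_TO_GROUP.get(color)
-- ===== Notes on version B (the rewrite author's own statement) =====
-- stated objective: idiomatic
-- what changed: A's explicit loop over group->name-list entries with an inner list-membership scan is replaced by a different data representation: compact space-separated name strings per group, inverted once (split + dict comprehension) into a name->group table queried with a single .get.
import Mathlib
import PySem

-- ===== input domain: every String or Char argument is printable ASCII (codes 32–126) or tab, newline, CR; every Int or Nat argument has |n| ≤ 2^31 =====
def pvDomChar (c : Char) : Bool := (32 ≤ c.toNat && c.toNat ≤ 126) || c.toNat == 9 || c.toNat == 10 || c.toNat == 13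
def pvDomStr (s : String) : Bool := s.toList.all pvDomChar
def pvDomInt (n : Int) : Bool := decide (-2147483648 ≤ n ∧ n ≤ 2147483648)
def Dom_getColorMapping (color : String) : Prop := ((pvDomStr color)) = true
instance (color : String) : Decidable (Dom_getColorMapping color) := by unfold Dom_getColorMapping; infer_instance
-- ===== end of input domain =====

-- B replaces A's loop over group→name-list entries (inner list-membership scan) by a
-- different data representation: space-separated name strings per group, inverted once
-- (split + comprehension) into a name→group table and queried with one .get (objective: idiomatic).

-- ===== PORT A =====
-- the dict literal of A (distinct keys, insertion order)
def pvJsonA : PySem.Dict String (List String) := PySem.Dict.ofList [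
  ("red", ["LightPink", "Pink", "Crimson", "HotPink", "DeepPink", "Orchid", "Thistle", "Plum", "Magenta", "DarkMagenta", "PeachPuff", "LightSalmon", "OrangeRed", "DarkSalmon", "Tomato", "MistyRose", "LightCoral", "RosyBrown", "IndianRed", "Red", "FireBrick", "DarkRed"]),
  ("purple", ["LavenderBlush", "PaleVioletRed", "MediumVioletRed", "Violet", "Purple", "MediumOrchid", "DarkViolet", "DarkOrchid", "Indigo", "BlueViolet", "MediumPurple"]),
  ("blue", ["MediumSlateBlue", "SlateBlue", "DarkSlateBlue", "Lavender", "Blue", "MediumBlue", "MidnightBlue", "DarkBlue", "Navy", "RoyalBlue", "CornflowerBlue", "LightSteelBlue", "DodgerBlue", "AliceBlue", "SteelBlue", "LightSkyBlue", "SkyBlue", "DeepSkyBlue", "LightBlue", "PowderBlue", "CadetBlue", "Azure", "PaleTurquoise", "Aqua", "DarkTurquoise", "MediumTurquoise", "Aquamarine", "MediumAquamarine"]),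
  ("gray", ["SlateGray", "LightSlateGray", "DarkSlateGray", "Gainsboro", "LightGrey", "Silver", "DarkGray", "Gray", "DimGray"]),
  ("black", ["Black"]),
  ("green", ["LightCyan", "Cyan", "DarkCyan", "Teal", "LightSeaGreen", "Turquoise", "MediumSpringGreen", "SpringGreen", "MediumSeaGreen", "SeaGreen", "LightGreen", "PaleGreen", "DarkSeaGreen", "LimeGreen", "Lime", "ForestGreen", "Green", "DarkGreen", "Chartreuse", "LawnGreen", "GreenYellow", "DarkOliveGreen", "YellowGreen", "OliveDrab", "Olive"]),
  ("white", ["GhostWhite", "MintCream", "Honeydew", "Beige", "Ivory", "FloralWhite", "OldLace", "BlanchedAlmond", "NavajoWhite", "AntiqueWhite", "Snow", "White", "WhiteSmoke"]),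
  ("yellow", ["LightGoldenrodYellow", "LightYellow", "Yellow", "DarkKhaki", "LemonChiffon", "PaleGoldenrod", "Khaki", "Gold", "Cornsilk", "Goldenrod", "DarkGoldenrod", "Wheat", "Moccasin", "Orange", "PapayaWhip", "Tan", "BurlyWood", "Bisque", "DarkOrange", "Linen", "Peru", "Seashell", "Sienna", "Salmon", "Maroon"]),
  ("brown", ["Chocolate", "SandyBrown", "SaddleBrown", "Coral", "Brown"]) ]

-- 'for key, value in json.items(): if color in value: return key' (falls through to None)
def pvLoopA : List (String × List String) → String → Option String
  | [], _ => none
  | (key, value) :: rest, color =>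
      if color ∈ value then some key else pvLoopA rest color

def getColorMapping (color : String) : Option String :=
  pvLoopA pvJsonA.items color

-- ===== PORT B =====
-- _GROUPS: each group with one space-separated string of its color names
def pvGroupsB : List (String × String) := [
  ("red", "LightPink Pink Crimson HotPink DeepPink Orchid Thistle Plum Magenta DarkMagenta PeachPuff LightSalmon OrangeRed DarkSalmon Tomato MistyRose LightCoral RosyBrown IndianRed Red FireBrick DarkRed"),
  ("purple", "LavenderBlush PaleVioletRed MediumVioletRed Violet Purple MediumOrchid DarkViolet DarkOrchid Indigo BlueViolet MediumPurple"),
  ("blue", "MediumSlateBlue SlateBlue DarkSlateBlue Lavender Blue MediumBlue MidnightBlue DarkBlue Navy RoyalBlue CornflowerBlue LightSteelBlue DodgerBlue AliceBlue SteelBlue LightSkyBlue SkyBlue DeepSkyBlue LightBlue PowderBlue CadetBlue Azure PaleTurquoise Aqua DarkTurquoise MediumTurquoise Aquamarine MediumAquamarine"),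
  ("gray", "SlateGray LightSlateGray DarkSlateGray Gainsboro LightGrey Silver DarkGray Gray DimGray"),
  ("black", "Black"),
  ("green", "LightCyan Cyan DarkCyan Teal LightSeaGreen Turquoise MediumSpringGreen SpringGreen MediumSeaGreen SeaGreen LightGreen PaleGreen DarkSeaGreen LimeGreen Lime ForestGreen Green DarkGreen Chartreuse LawnGreen GreenYellow DarkOliveGreen YellowGreen OliveDrab Olive"),
  ("white", "GhostWhite MintCream Honeydew Beige Ivory FloralWhite OldLace BlanchedAlmond NavajoWhite AntiqueWhite Snow White WhiteSmoke"),
  ("yellow", "LightGoldenrodYellow LightYellow Yellow DarkKhaki LemonChiffon PaleGoldenrod Khaki Gold Cornsilk Goldenrod DarkGoldenrod Wheat Moccasin Orange PapayaWhip Tan BurlyWood Bisque DarkOrange Linen Peru Seashell Sienna Salmon Maroon"),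
  ("brown", "Chocolate SandyBrown SaddleBrown Coral Brown") ]

-- _NAME_TO_GROUP = {name: group for group, names in _GROUPS for name in names.split()}
def pvNameToGroupB : PySem.Dict String String :=
  PySem.Dict.ofList
    (pvGroupsB.flatMap (fun gn => (PySem.Str.split₀ gn.2).map (fun name => (name, gn.1))))

def getColorMapping_alt (color : String) : Option String :=
  pvNameToGroupB.get? color

-- ===== PRECONDITION & SPEC =====
def Spec_getColorMapping (color : String) (out : Option String) : Prop := out = getColorMapping_alt color
instance (color : String) (out : Option String) : Decidable (Spec_getColorMapping color out) := by unfold Spec_getColorMapping; infer_instance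

-- ===== CLAIM (what is proved, stated in full; the proofs are below) =====
def Claim_equal_getColorMapping : Prop := ∀ (color : String), Dom_getColorMapping color → Spec_getColorMapping color (getColorMapping color)

-- ===== LEMMAS AND PROOFS =====

-- A's loop equals first-match lookup in the flattened (name, group) association list
theorem pvLoopA_eq_mk (items : List (String × List String)) (color : String) :
    pvLoopA items color =
      (PySem.Dict.mk (items.flatMap (fun gv => gv.2.map (fun n => (n, gv.1))))).get? color := by
  induction items with
  | nil => simp [pvLoopA, PySem.Dict.get?]
  | cons gv rest ih =>
      obtain ⟨key, value⟩ := gv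
      induction value with
      | nil => simpa [pvLoopA] using ih
      | cons n ns ihv =>
          by_cases h : n = color
          · simp [pvLoopA, h, PySem.Dict.get?_mk_cons]
          · simp only [pvLoopA, List.flatMap_cons, List.map_cons, List.cons_append,
              PySem.Dict.get?_mk_cons, beq_iff_eq, h, if_false, List.mem_cons]
            have hne : ¬ color = n := fun hc => h hc.symm
            simpa [pvLoopA, hne] using ihv

-- B's inverted dict (built from the split strings) is exactly A's flattened pair list
set_option maxRecDepth 20000 in
set_option maxHeartbeats 1000000 in
theorem pvNameToGroupB_eq_mkA :
    pvNameToGroupB =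
      PySem.Dict.mk (pvJsonA.items.flatMap (fun gv => gv.2.map (fun n => (n, gv.1)))) := by
  apply PySem.Dict.ext
  decide

-- ===== VERDICT (by name: the statement is the Claim_ definition above) =====
theorem getColorMapping_spec : Claim_equal_getColorMapping := by
  intro color _
  unfold Spec_getColorMapping getColorMapping getColorMapping_alt
  rw [pvLoopA_eq_mk, pvNameToGroupB_eq_mkA]
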